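-- pv_equiv track=rewrite | github.com/Michelozzi2/L3 | atelier_3/atelier3_exo1.py | full_name2
-- ===== SOURCE A (Python) =====
-- def full_name2(str_arg: str) -> str:
--     counter = 0
--     nom = ""
--     longueur_mot = len(str_arg)
--     ascii = 32
--
--     while counter < longueur_mot and str_arg[counter] != " ":
--         nom += chr(ord(str_arg[counter]) - ascii)
--         counter += 1
--     return nom + " " + chr(ord(str_arg[counter:][1]) - ascii) + str_arg[counter+2:]
-- ===== SOURCE B (Python) =====
-- def full_name2(str_arg: str) -> str:
--     # single uniform pass: a 3-state machine over every character, no slicing/indexing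
--     out = []
--     state = 0  # 0 = inside first word, 1 = first char after the space, 2 = rest copied verbatim
--     for c in str_arg:
--         if state == 0 and c == " ":
--             out.append(" ")
--             state = 1
--         elif state <= 1:
--             out.append(chr(ord(c) - 32))
--             if state == 1:
--                 state = 2
--         else:
--             out.append(c)
--     return "".join(out)
-- ===== Notes on version B (the rewrite author's own statement) =====
-- stated objective: alternative
-- what changed: Replaced A's partial while-scan plus arithmetic slicing (counter, str_arg[counter:][1], str_arg[counter+2:]) by one uniform pass over every character with an explicit 3-state machine (first word / char after the space / verbatim tail) accumulating the output list; the literal chr(ord(c)-32) arithmetic is kept.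
import Mathlib
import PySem

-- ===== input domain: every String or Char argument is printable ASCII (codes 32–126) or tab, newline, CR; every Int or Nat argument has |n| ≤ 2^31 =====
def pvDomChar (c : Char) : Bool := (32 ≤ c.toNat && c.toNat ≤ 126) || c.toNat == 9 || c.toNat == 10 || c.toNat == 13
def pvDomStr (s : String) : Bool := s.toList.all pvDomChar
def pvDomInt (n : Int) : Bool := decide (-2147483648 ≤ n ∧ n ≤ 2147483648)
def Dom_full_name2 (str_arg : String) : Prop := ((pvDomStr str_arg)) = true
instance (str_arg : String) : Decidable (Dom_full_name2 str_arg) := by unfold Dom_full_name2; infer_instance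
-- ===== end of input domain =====

-- B replaces A's partial scan + slicing by one uniform 3-state pass over every character (alternative decomposition, same cost).

-- chr(ord(c) - 32), shared by both Pythons verbatim (Python raises on a code < 32; Pre_ excludes that)
def pyChrSub32 (c : Char) : Char := Char.ofNat (((c.toNat : Int) - 32).toNat)

-- ===== PORT A =====
-- the while loop: scans chars until end or ' ', building nom; returns (nom, str_arg[counter:])
def fullNameLoopA : List Char → (List Char × List Char)
  | [] => ([], [])
  | c :: cs =>
    if c = ' ' then ([], c :: cs)
    else
      let p := fullNameLoopA cs
      (pyChrSub32 c :: p.1, p.2)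

def full_name2 (str_arg : String) : String :=
  let p := fullNameLoopA str_arg.toList
  -- str_arg[counter:][1] → pyGet? of the suffix at index 1 (none = IndexError, excluded by Pre_)
  match PySem.List.pyGet? p.2 1 with
  | none => ""
  | some c2 => String.ofList (p.1 ++ [' '] ++ [pyChrSub32 c2] ++ p.2.drop 2)  -- str_arg[counter+2:] = suffix.drop 2

-- ===== PORT B =====
-- one step of B's state machine: state 0 = first word, 1 = char right after the space, 2 = tail
def fullNameStepB (st : Nat × List Char) (c : Char) : Nat × List Char :=
  if st.1 = 0 ∧ c = ' ' then (1, st.2 ++ [' '])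
  else if st.1 ≤ 1 then (if st.1 = 1 then 2 else st.1, st.2 ++ [pyChrSub32 c])
  else (st.1, st.2 ++ [c])

def full_name2_alt (str_arg : String) : String :=
  String.ofList (str_arg.toList.foldl fullNameStepB (0, [])).2

-- ===== PRECONDITION & SPEC =====
-- Pre_ = exactly the inputs where A returns: there is a space with at least one more char after it
-- (so str_arg[counter:][1] exists), and every char fed to chr(ord(c)-32) has code ≥ 32 (no tab/newline/CR
-- in the first word or right after the first space, where chr would raise ValueError).
def Pre_full_name2 (str_arg : String) : Prop :=
  ((str_arg.toList.takeWhile (· ≠ ' ')).all (fun c => 32 ≤ c.toNat) = true) ∧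
  2 ≤ (str_arg.toList.dropWhile (· ≠ ' ')).length ∧
  32 ≤ ((str_arg.toList.dropWhile (· ≠ ' ')).getD 1 ' ').toNat
instance (str_arg : String) : Decidable (Pre_full_name2 str_arg) := by unfold Pre_full_name2; infer_instance
def pvWitness_full_name2 : String := "john doe"

def Spec_full_name2 (str_arg : String) (out : String) : Prop := out = full_name2_alt str_arg
instance (str_arg : String) (out : String) : Decidable (Spec_full_name2 str_arg out) := by unfold Spec_full_name2; infer_instance

-- ===== CLAIM (what is proved, stated in full; the proofs are below) =====
def Claim_equal_full_name2 : Prop := ∀ (str_arg : String), Dom_full_name2 str_arg → Pre_full_name2 str_arg → Spec_full_name2 str_arg (full_name2 str_arg)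

-- ===== LEMMAS AND PROOFS =====

theorem dropWhile_head_false (p : Char → Bool) (L r1 : List Char) (a : Char)
    (h : L.dropWhile p = a :: r1) : p a = false := by
  induction L with
  | nil => simp at h
  | cons c cs ih =>
    rw [List.dropWhile_cons] at h
    by_cases hp : p c
    · simp [hp] at h; exact ih h
    · simp [hp] at h; rw [h.1] at hp; simpa using hp

-- A's loop computes (map of the first word, suffix from the first space)
theorem fullNameLoopA_eq (L : List Char) :
    fullNameLoopA L = ((L.takeWhile (· ≠ ' ')).map pyChrSub32, L.dropWhile (· ≠ ' ')) := by
  induction L with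
  | nil => rfl
  | cons c cs ih =>
    by_cases h : c = ' ' <;> simp [fullNameLoopA, List.takeWhile, List.dropWhile, h, ih]

-- B's fold in state 0 over a space-free prefix uppercases each char
theorem foldB_state0 (T : List Char) (hT : ' ' ∉ T) (out : List Char) :
    T.foldl fullNameStepB (0, out) = (0, out ++ T.map pyChrSub32) := by
  induction T generalizing out with
  | nil => simp
  | cons c cs ih =>
    have hc : c ≠ ' ' := fun h => hT (by simp [h])
    simp only [List.foldl_cons, fullNameStepB]
    rw [if_neg (by simp [hc]), if_pos (by norm_num)]
    simp only [if_neg (by norm_num : ¬ (0 : Nat) = 1)]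
    rw [ih (fun h => hT (List.mem_cons_of_mem _ h))]
    simp

-- B's fold in state 2 copies verbatim
theorem foldB_state2 (R : List Char) (out : List Char) :
    R.foldl fullNameStepB (2, out) = (2, out ++ R) := by
  induction R generalizing out with
  | nil => simp
  | cons c cs ih =>
    simp only [List.foldl_cons, fullNameStepB]
    rw [if_neg (by norm_num), if_neg (by norm_num)]
    rw [ih]
    simp

theorem full_name2_spec : Claim_equal_full_name2 := by
  intro s _ hpre
  unfold Spec_full_name2
  obtain ⟨-, hlen, -⟩ := hpre
  set L := s.toList with hL
  set r := L.dropWhile (· ≠ ' ') with hr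
  obtain ⟨a, r1, hr1⟩ : ∃ a r1, r = a :: r1 := by
    cases hrc : r with
    | nil => rw [hrc] at hlen; simp at hlen
    | cons a r1 => exact ⟨a, r1, rfl⟩
  have ha : a = ' ' := by
    have := dropWhile_head_false _ L r1 a (hr.symm.trans hr1)
    simpa using this
  obtain ⟨c2, r2, hr2⟩ : ∃ c2 r2, r1 = c2 :: r2 := by
    cases hrc : r1 with
    | nil => rw [hr1, hrc] at hlen; simp at hlen
    | cons c2 r2 => exact ⟨c2, r2, rfl⟩
  have hTd : L = L.takeWhile (· ≠ ' ') ++ (' ' :: c2 :: r2) := by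
    conv_lhs => rw [← List.takeWhile_append_dropWhile (p := (· ≠ ' ')) (l := L)]
    rw [← hr, hr1, hr2, ha]
  have hTmem : ' ' ∉ L.takeWhile (· ≠ ' ') := by
    intro hm
    have := List.mem_takeWhile_imp hm
    simp at this
  -- evaluate A's port
  have hA : full_name2 s = String.ofList
      ((L.takeWhile (· ≠ ' ')).map pyChrSub32 ++ [' '] ++ [pyChrSub32 c2] ++ r2) := by
    unfold full_name2
    rw [← hL, fullNameLoopA_eq]
    simp only [← hr, hr1, hr2, ha]
    simp [PySem.List.pyGet?, PySem.List.pyIdx?]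
  -- evaluate B's port
  have hB : full_name2_alt s = String.ofList
      ((L.takeWhile (· ≠ ' ')).map pyChrSub32 ++ [' '] ++ [pyChrSub32 c2] ++ r2) := by
    unfold full_name2_alt
    rw [← hL]
    conv_lhs => rw [hTd]
    rw [List.foldl_append, foldB_state0 _ hTmem]
    simp only [List.foldl_cons]
    -- the space: state 0 → 1
    rw [show ∀ out : List Char, fullNameStepB (0, out) ' ' = (1, out ++ [' ']) by
        intro out; simp [fullNameStepB]]
    -- c2: state 1 → 2, uppercased
    rw [show ∀ out, fullNameStepB (1, out) c2 = (2, out ++ [pyChrSub32 c2]) by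
        intro out; simp [fullNameStepB]]
    rw [foldB_state2]
    simp
  rw [hA, hB]
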